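-- pv_equiv track=rewrite | github.com/somang/competitive_coding | 2014_codejam/deceitful war/deceitfulwar.py | deceitfulwar
-- ===== SOURCE A (Python) =====
-- def deceitfulwar(naomi_blocks, ken_blocks, N):
--     naomi_wins = 0
--     turn_count = 0
--     while turn_count < N:
--         ChosenNaomi = naomi_blocks[0]
--         KenOption = [block for block in ken_blocks if block >= ChosenNaomi]
--         if KenOption == []:
--             ChosenKen = ken_blocks.pop(ken_blocks.index(min(ken_blocks)))
--         else:
--             ChosenKen = ken_blocks.pop(ken_blocks.index(min(KenOption)))
--         NaomiOption = [block for block in naomi_blocks if block >= ChosenKen]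
--         if NaomiOption != []:
--             ChosenNaomi = naomi_blocks.pop(naomi_blocks.index(min(NaomiOption)))
--         if ChosenNaomi > ChosenKen:
--             naomi_wins += 1
--         turn_count += 1
--     return naomi_wins
-- ===== SOURCE B (Python) =====
-- def deceitfulwar(naomi_blocks, ken_blocks, N):
--     # Pre-sort both sides once; each turn uses binary search on the sorted
--     # copies instead of A's repeated filter/min/index full scans.
--     def bisect_left(a, x):
--         lo, hi = 0, len(a)
--         while lo < hi:
--             mid = (lo + hi) // 2
--             if a[mid] < x:
--                 lo = mid + 1
--             else:
--                 hi = mid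
--         return lo
--
--     ken = sorted(ken_blocks)          # Ken's blocks, kept sorted
--     vals = sorted(naomi_blocks)       # Naomi's blocks, kept sorted
--     rem = list(naomi_blocks)          # Naomi's blocks in original order (for the announced head)
--     wins = 0
--     for _ in range(N):
--         head = rem[0]
--         j = bisect_left(ken, head)    # Ken plays his smallest block >= head ...
--         if j == len(ken):
--             j = 0                     # ... or his overall smallest
--         ck = ken.pop(j)
--         i = bisect_left(vals, ck)
--         if i < len(vals):             # Naomi actually plays her smallest block >= ck
--             cn = vals.pop(i)
--             rem.remove(cn)
--             if cn > ck:
--                 wins += 1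
--     return wins
-- ===== Notes on version B (the rewrite author's own statement) =====
-- stated objective: faster
-- what changed: B pre-sorts both block lists once and replaces A's per-turn filter/min/index full scans with binary searches on the sorted copies (plus one remove on Naomi's original-order list), keeping the same turn-by-turn play-out.
-- outside the precondition, e.g. on deceitfulwar([1], [5, 5], 2): A returns 0, B returns 0
import Mathlib
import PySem

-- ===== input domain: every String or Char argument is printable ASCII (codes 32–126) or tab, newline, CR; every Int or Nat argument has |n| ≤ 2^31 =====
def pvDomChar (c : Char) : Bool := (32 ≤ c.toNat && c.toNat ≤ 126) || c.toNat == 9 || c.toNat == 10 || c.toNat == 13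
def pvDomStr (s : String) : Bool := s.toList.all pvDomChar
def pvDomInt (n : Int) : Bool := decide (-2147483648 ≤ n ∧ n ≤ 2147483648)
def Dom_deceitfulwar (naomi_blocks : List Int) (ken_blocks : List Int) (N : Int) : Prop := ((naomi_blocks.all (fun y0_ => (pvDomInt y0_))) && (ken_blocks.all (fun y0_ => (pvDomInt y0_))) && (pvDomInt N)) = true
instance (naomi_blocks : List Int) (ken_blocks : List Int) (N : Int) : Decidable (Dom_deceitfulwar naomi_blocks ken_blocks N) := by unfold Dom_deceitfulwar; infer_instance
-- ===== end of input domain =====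

-- B pre-sorts both block lists once and replaces A's per-turn filter/min/index full scans with
-- binary searches on the sorted copies (same turn-by-turn play-out; measured faster).
-- A mutates its list arguments in place (pop); the equivalence proved here is about the return value only.


-- ===== PORT A =====
-- l.pop(l.index(v))
def warPopAt (l : List Int) (v : Int) : Option (Int × List Int) :=
  match PySem.List.index? l v with
  | none => none
  | some k => PySem.List.pop? l (Int.ofNat k)

def warLoopA : Nat → List Int → List Int → Int → Int
  | 0, _, _, wins => wins
  | fuel+1, naomi, ken, wins =>
    match naomi with
    | [] => wins                      -- naomi_blocks[0]: IndexError (outside Pre_)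
    | chosenNaomi :: _ =>
      let kenOption := ken.filter (fun b => decide (chosenNaomi ≤ b))
      let kenRes :=
        if kenOption = [] then
          match PySem.List.min? ken (fun b => b) with
          | none => none
          | some m => warPopAt ken m
        else
          match PySem.List.min? kenOption (fun b => b) with
          | none => none
          | some m => warPopAt ken m
      match kenRes with
      | none => wins                  -- min([]): ValueError (outside Pre_)
      | some (chosenKen, ken') =>
        let naomiOption := naomi.filter (fun b => decide (chosenKen ≤ b))
        let naomiRes : Option (Int × List Int) :=
          if naomiOption = [] then some (chosenNaomi, naomi)
          else
            match PySem.List.min? naomiOption (fun b => b) with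
            | none => none
            | some m => warPopAt naomi m
        match naomiRes with
        | none => wins                -- unreachable (min of a nonempty list)
        | some (chosenNaomi', naomi') =>
          warLoopA fuel naomi' ken' (if chosenKen < chosenNaomi' then wins + 1 else wins)

def deceitfulwar (naomi_blocks : List Int) (ken_blocks : List Int) (N : Int) : Int :=
  warLoopA N.toNat naomi_blocks ken_blocks 0

-- ===== PORT B =====
-- Source B's hand-written bisect_left loop is exactly PySem.List.bisectLeft's loop.
def warLoopB : Nat → List Int → List Int → List Int → Int → Int
  | 0, _, _, _, wins => wins
  | fuel+1, rem, vals, ken, wins =>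
    match rem with
    | [] => wins                      -- rem[0]: IndexError (outside Pre_)
    | head :: _ =>
      let j0 := PySem.List.bisectLeft ken head
      let j := if j0 = ken.length then 0 else j0
      match PySem.List.pop? ken (Int.ofNat j) with
      | none => wins                  -- pop from empty list: IndexError (outside Pre_)
      | some (ck, ken') =>
        let i := PySem.List.bisectLeft vals ck
        if i < vals.length then
          match PySem.List.pop? vals (Int.ofNat i) with
          | none => wins              -- unreachable (i < len(vals))
          | some (cn, vals') =>
            match PySem.List.remove? rem cn with
            | none => wins            -- unreachable (cn is a value of rem)
            | some rem' =>
              warLoopB fuel rem' vals' ken' (if ck < cn then wins + 1 else wins)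
        else warLoopB fuel rem vals ken' wins

def deceitfulwar_alt (naomi_blocks : List Int) (ken_blocks : List Int) (N : Int) : Int :=
  warLoopB N.toNat naomi_blocks
    (PySem.List.sorted naomi_blocks (fun v => v) false)
    (PySem.List.sorted ken_blocks (fun v => v) false) 0

-- ===== PRECONDITION & SPEC =====
-- Pre_ bounds N by both list lengths: beyond them A's loop can run out of blocks and raise
-- (ValueError on min([]) / IndexError on naomi_blocks[0]); on some excluded inputs A still
-- happens to return (Naomi skips her pop), and B returns the same value there.
def Pre_deceitfulwar (naomi_blocks : List Int) (ken_blocks : List Int) (N : Int) : Prop :=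
  N ≤ naomi_blocks.length ∧ N ≤ ken_blocks.length
instance (naomi_blocks : List Int) (ken_blocks : List Int) (N : Int) : Decidable (Pre_deceitfulwar naomi_blocks ken_blocks N) := by unfold Pre_deceitfulwar; infer_instance
def pvWitness_deceitfulwar : List Int × List Int × Int := ([3, 7, 1], [2, 7, 5], 3)

def Spec_deceitfulwar (naomi_blocks : List Int) (ken_blocks : List Int) (N : Int) (out : Int) : Prop := out = deceitfulwar_alt naomi_blocks ken_blocks N
instance (naomi_blocks : List Int) (ken_blocks : List Int) (N : Int) (out : Int) : Decidable (Spec_deceitfulwar naomi_blocks ken_blocks N out) := by unfold Spec_deceitfulwar; infer_instance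

-- ===== CLAIM (what is proved, stated in full; the proofs are below) =====
def Claim_equal_deceitfulwar : Prop := ∀ (naomi_blocks : List Int) (ken_blocks : List Int) (N : Int), Dom_deceitfulwar naomi_blocks ken_blocks N → Pre_deceitfulwar naomi_blocks ken_blocks N → Spec_deceitfulwar naomi_blocks ken_blocks N (deceitfulwar naomi_blocks ken_blocks N)

-- ===== LEMMAS AND PROOFS =====

lemma warPopAt_of_mem (l : List Int) (v : Int) (hv : v ∈ l) :
    warPopAt l v = some (v, l.erase v) := by
  unfold warPopAt
  rw [PySem.List.index?_eq_idxOf?]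
  cases h : List.idxOf? v l with
  | none => simp [List.idxOf?_eq_none_iff] at h; exact absurd hv h
  | some k =>
    obtain ⟨hk, hval, _⟩ := List.idxOf?_eq_some_iff.mp h
    show PySem.List.pop? l (Int.ofNat k) = _
    rw [show (Int.ofNat k) = (k : Int) from rfl, PySem.List.pop?_natCast l k hk,
      List.erase_eq_eraseIdx, h, hval]


lemma bisect_min (vals l : List Int) (x : Int)
    (hperm : vals.Perm l) (hsort : vals.Pairwise (· ≤ ·))
    (hlt : PySem.List.bisectLeft vals x < vals.length) :
    PySem.List.min? (l.filter (fun b => decide (x ≤ b))) (fun b => b)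
      = some (vals[PySem.List.bisectLeft vals x]'hlt) ∧
    vals[PySem.List.bisectLeft vals x]'hlt ∈ l ∧
    x ≤ vals[PySem.List.bisectLeft vals x]'hlt := by
  obtain ⟨hle, hlo, hhi⟩ := PySem.List.bisectLeft_spec vals x hsort
  set i := PySem.List.bisectLeft vals x with hi
  have hxm : x ≤ vals[i] := hhi i hlt le_rfl
  have hmem : vals[i] ∈ l := hperm.mem_iff.mp (List.getElem_mem hlt)
  have hmemf : vals[i] ∈ l.filter (fun b => decide (x ≤ b)) := by
    simp [List.mem_filter, hmem, hxm]
  refine ⟨?_, hmem, hxm⟩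
  cases hm : PySem.List.min? (l.filter (fun b => decide (x ≤ b))) (fun b => b) with
  | none =>
    rw [PySem.List.min?_eq_none_iff] at hm
    rw [hm] at hmemf; cases hmemf
  | some m =>
    have hmf := PySem.List.min?_mem hm
    have hmin := PySem.List.min?_isMin hm
    have h1 : m ≤ vals[i] := hmin _ hmemf
    have hml : m ∈ vals := by
      rw [List.mem_filter] at hmf
      exact hperm.symm.mem_iff.mp hmf.1
    obtain ⟨k, hk, hkm⟩ := List.mem_iff_getElem.mp hml
    have hxm2 : x ≤ m := by
      rw [List.mem_filter] at hmf; simpa using hmf.2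
    have h2 : vals[i] ≤ m := by
      by_cases hki : k < i
      · exact absurd (hkm ▸ hlo k hk hki) (not_lt.mpr hxm2)
      · rcases Nat.lt_or_ge i k with h2 | h2
        · exact hkm ▸ (List.pairwise_iff_getElem.mp hsort i k hlt hk h2)
        · have : k = i := by omega
          subst this; exact hkm.le
    rw [le_antisymm h1 h2]

lemma bisect_none (vals l : List Int) (x : Int)
    (hperm : vals.Perm l) (hsort : vals.Pairwise (· ≤ ·))
    (heq : PySem.List.bisectLeft vals x = vals.length) :
    l.filter (fun b => decide (x ≤ b)) = [] := by
  obtain ⟨hle, hlo, hhi⟩ := PySem.List.bisectLeft_spec vals x hsort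
  rw [List.filter_eq_nil_iff]
  intro b hb
  obtain ⟨k, hk, hkm⟩ := List.mem_iff_getElem.mp (hperm.symm.mem_iff.mp hb)
  have := hlo k hk (heq ▸ hk)
  simp [← hkm]; omega

lemma eraseIdx_first (vals : List Int) (i : Nat) (hlt : i < vals.length)
    (hne : ∀ k (hk : k < vals.length), k < i → vals[k] ≠ vals[i]) :
    vals.eraseIdx i = vals.erase (vals[i]'hlt) := by
  rw [List.erase_eq_eraseIdx]
  cases h : List.idxOf? (vals[i]'hlt) vals with
  | none =>
    rw [List.idxOf?_eq_none_iff] at h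
    exact absurd (List.getElem_mem hlt) h
  | some k =>
    obtain ⟨hk, hval, hfst⟩ := List.idxOf?_eq_some_iff.mp h
    have : k = i := by
      rcases lt_trichotomy k i with h1 | h1 | h1
      · exact absurd hval (hne k hk h1)
      · exact h1
      · exact absurd rfl (hfst i h1)
    rw [this]

lemma min_head (vals l : List Int) (h0 : 0 < vals.length)
    (hperm : vals.Perm l) (hsort : vals.Pairwise (· ≤ ·)) :
    PySem.List.min? l (fun b => b) = some (vals[0]'h0) := by
  cases hm : PySem.List.min? l (fun b => b) with
  | none =>
    rw [PySem.List.min?_eq_none_iff] at hm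
    subst hm
    rw [List.perm_nil] at hperm
    simp [hperm] at h0
  | some m =>
    have hml : m ∈ vals := hperm.symm.mem_iff.mp (PySem.List.min?_mem hm)
    obtain ⟨k, hk, hkm⟩ := List.mem_iff_getElem.mp hml
    have h1 : m ≤ vals[0] := PySem.List.min?_isMin hm _ (hperm.mem_iff.mp (List.getElem_mem h0))
    have h2 : vals[0] ≤ m := by
      rcases Nat.eq_zero_or_pos k with rfl | hkp
      · exact hkm.le
      · exact hkm ▸ (List.pairwise_iff_getElem.mp hsort 0 k h0 hk hkp)
    rw [le_antisymm h2 h1]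

-- the Naomi half of one turn, after the two sides agreed on Ken's block c
lemma war_phase2 (n : Nat)
    (IH : ∀ (naomiA kenA vals kenB : List Int) (wins : Int),
      n ≤ naomiA.length → n ≤ kenA.length → vals.Perm naomiA → vals.Pairwise (· ≤ ·) →
      kenB.Perm kenA → kenB.Pairwise (· ≤ ·) →
      warLoopA n naomiA kenA wins = warLoopB n naomiA vals kenB wins)
    (h c wins : Int) (t kenA' vals kenB' : List Int)
    (hn : n + 1 ≤ (h :: t).length) (hk' : n ≤ kenA'.length)
    (hpv : vals.Perm (h :: t)) (hsv : vals.Pairwise (· ≤ ·))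
    (hpk : kenB'.Perm kenA') (hsk : kenB'.Pairwise (· ≤ ·)) :
    (match (if (h :: t).filter (fun b => decide (c ≤ b)) = [] then some (h, h :: t)
            else match PySem.List.min? ((h :: t).filter (fun b => decide (c ≤ b))) (fun b => b) with
                 | none => none
                 | some m => warPopAt (h :: t) m) with
     | none => wins
     | some (cn, na') => warLoopA n na' kenA' (if c < cn then wins + 1 else wins))
    =
    (if PySem.List.bisectLeft vals c < vals.length then
       match PySem.List.pop? vals (Int.ofNat (PySem.List.bisectLeft vals c)) with
       | none => wins
       | some (cn, vals') =>
         match PySem.List.remove? (h :: t) cn with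
         | none => wins
         | some rem' => warLoopB n rem' vals' kenB' (if c < cn then wins + 1 else wins)
     else warLoopB n (h :: t) vals kenB' wins) := by
  obtain ⟨hle, hlo, hhi⟩ := PySem.List.bisectLeft_spec vals c hsv
  by_cases hi : PySem.List.bisectLeft vals c < vals.length
  · obtain ⟨hminf, hmem, hcle⟩ := bisect_min vals (h :: t) c hpv hsv hi
    have hfne : ¬ ((h :: t).filter (fun b => decide (c ≤ b)) = []) := by
      intro he; rw [he] at hminf; simp [PySem.List.min?] at hminf
    rw [if_neg hfne, hminf, if_pos hi,
      show (Int.ofNat (PySem.List.bisectLeft vals c)) = ((PySem.List.bisectLeft vals c : Nat) : Int) from rfl,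
      PySem.List.pop?_natCast vals _ hi]
    simp only [warPopAt_of_mem _ _ hmem,
      PySem.List.remove?_eq_some_erase (h :: t) _ hmem,
      eraseIdx_first vals _ hi (fun k hk hki => ne_of_lt (lt_of_lt_of_le (hlo k hk hki) hcle))]
    apply IH
    · rw [List.length_erase_of_mem hmem]; simp at hn ⊢; omega
    · exact hk'
    · exact hpv.erase _
    · exact List.Pairwise.sublist List.erase_sublist hsv
    · exact hpk
    · exact hsk
  · have hi' : PySem.List.bisectLeft vals c = vals.length := by omega
    have hfil := bisect_none vals (h :: t) c hpv hsv hi'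
    rw [if_pos hfil, if_neg hi]
    have hch : ¬ (c < h) := by
      have := (List.filter_eq_nil_iff.mp hfil) h (List.mem_cons_self)
      simp at this; omega
    show warLoopA n (h :: t) kenA' (if c < h then wins + 1 else wins) = _
    rw [if_neg hch]
    apply IH <;> first
      | exact hpv | exact hsv | exact hpk | exact hsk | exact hk' | (simp at hn ⊢; omega)

lemma war_eq : ∀ (fuel : Nat) (naomiA kenA vals kenB : List Int) (wins : Int),
    fuel ≤ naomiA.length → fuel ≤ kenA.length →
    vals.Perm naomiA → vals.Pairwise (· ≤ ·) →
    kenB.Perm kenA → kenB.Pairwise (· ≤ ·) →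
    warLoopA fuel naomiA kenA wins = warLoopB fuel naomiA vals kenB wins := by
  intro fuel
  induction fuel with
  | zero => intros; rfl
  | succ n ih =>
    intro naomiA kenA vals kenB wins hn hk hpv hsv hpk hsk
    cases naomiA with
    | nil => simp at hn
    | cons h t =>
    obtain ⟨hle, hlo, hhi⟩ := PySem.List.bisectLeft_spec kenB h hsk
    have hklen : kenB.length = kenA.length := hpk.length_eq
    have hk0 : 0 < kenB.length := by omega
    simp only [warLoopA, warLoopB]
    by_cases hj : PySem.List.bisectLeft kenB h = kenB.length
    · -- Ken has no block ≥ h: he plays his overall smallest, kenB[0]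
      have hfil := bisect_none kenB kenA h hpk hsk hj
      have hmin := min_head kenB kenA hk0 hpk hsk
      have hcmem : kenB[0] ∈ kenA := hpk.mem_iff.mp (List.getElem_mem hk0)
      rw [hfil, if_pos rfl, hmin, if_pos hj,
        show (Int.ofNat 0) = ((0 : Nat) : Int) from rfl, PySem.List.pop?_natCast kenB 0 hk0]
      simp only [warPopAt_of_mem _ _ hcmem,
        eraseIdx_first kenB 0 hk0 (fun k hk hki => absurd hki (Nat.not_lt_zero k))]
      exact war_phase2 n ih h (kenB[0]) wins t (kenA.erase kenB[0]) vals (kenB.erase kenB[0]) hn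
        (by rw [List.length_erase_of_mem hcmem]; omega) hpv hsv (hpk.erase _)
        (List.Pairwise.sublist List.erase_sublist hsk)
    · -- Ken has a block ≥ h: the first such in sorted order, kenB[j0]
      have hj' : PySem.List.bisectLeft kenB h < kenB.length := by omega
      obtain ⟨hminf, hcmem, hhc⟩ := bisect_min kenB kenA h hpk hsk hj'
      have hfne : ¬ (kenA.filter (fun b => decide (h ≤ b)) = []) := by
        intro he; rw [he] at hminf; simp [PySem.List.min?] at hminf
      rw [if_neg hfne, hminf, if_neg hj,
        show (Int.ofNat (PySem.List.bisectLeft kenB h)) = ((PySem.List.bisectLeft kenB h : Nat) : Int) from rfl,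
        PySem.List.pop?_natCast kenB _ hj']
      simp only [warPopAt_of_mem _ _ hcmem,
        eraseIdx_first kenB _ hj' (fun k hk hki => ne_of_lt (lt_of_lt_of_le (hlo k hk hki) hhc))]
      exact war_phase2 n ih h _ wins t (kenA.erase _) vals (kenB.erase _) hn
        (by rw [List.length_erase_of_mem hcmem]; omega) hpv hsv (hpk.erase _)
        (List.Pairwise.sublist List.erase_sublist hsk)

-- ===== VERDICT (by name: the statement is the Claim_ definition above) =====
theorem deceitfulwar_spec : Claim_equal_deceitfulwar := by
  intro naomi ken N _ hpre
  unfold Spec_deceitfulwar deceitfulwar deceitfulwar_alt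
  obtain ⟨h1, h2⟩ := hpre
  apply war_eq
  · omega
  · omega
  · exact PySem.List.sorted_perm naomi (fun v => v) false
  · exact PySem.List.sorted_pairwise naomi (fun v => v)
  · exact PySem.List.sorted_perm ken (fun v => v) false
  · exact PySem.List.sorted_pairwise ken (fun v => v)
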